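-- pv_equiv track=rewrite | github.com/ChiragSinghai/450-Questions | Chirag/Array/maximum product subarray.py | brutual_force
-- ===== SOURCE A (Python) =====
-- def brutual_force(A,n):
--     m=A[0]
--     for i in range(n):
--         prod=A[i]
--         for j in range(i+1,n):
--             prod=prod*A[j]
--         m=max(m,prod)
--     return m
-- ===== SOURCE B (Python) =====
-- def brutual_force(A, n):
--     m = A[0]
--     suf = 1
--     for i in range(n - 1, -1, -1):
--         suf *= A[i]
--         m = max(m, suf)
--     return m
-- ===== Notes on version B (the rewrite author's own statement) =====
-- stated objective: faster
-- what changed: Replaced the nested product recomputation for every start index by a single right-to-left pass that maintains the running suffix product and its maximum.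
import Mathlib
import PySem

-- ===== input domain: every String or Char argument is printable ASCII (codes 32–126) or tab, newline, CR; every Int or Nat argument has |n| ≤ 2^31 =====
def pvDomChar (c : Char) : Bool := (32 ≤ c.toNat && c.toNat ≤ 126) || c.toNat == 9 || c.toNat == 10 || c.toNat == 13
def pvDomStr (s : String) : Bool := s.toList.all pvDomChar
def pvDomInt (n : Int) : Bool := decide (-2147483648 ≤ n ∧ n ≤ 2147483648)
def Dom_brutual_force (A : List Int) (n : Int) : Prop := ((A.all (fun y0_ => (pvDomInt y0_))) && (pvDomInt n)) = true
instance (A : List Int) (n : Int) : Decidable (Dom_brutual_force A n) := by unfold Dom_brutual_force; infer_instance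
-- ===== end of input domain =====

-- B replaces A's quadratic per-start-index product recomputation by one right-to-left pass
-- maintaining the running suffix product and its maximum (objective: faster, asymptotic).


-- ===== PORT A =====
-- literal transliteration; A[k] is pyGetD with default 0: Pre_ guarantees every access is in range
def brutual_force (A : List Int) (n : Int) : Int :=
  let m := PySem.List.pyGetD A 0 0
  (PySem.List.pyRange 0 n 1).foldl (fun m i =>
    let prod := PySem.List.pyGetD A i 0
    let prod := (PySem.List.pyRange (i+1) n 1).foldl (fun p j => p * PySem.List.pyGetD A j 0) prod
    max m prod) m

-- ===== PORT B =====
def brutual_force_alt (A : List Int) (n : Int) : Int :=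
  let m := PySem.List.pyGetD A 0 0
  ((PySem.List.pyRange (n-1) (-1) (-1)).foldl
    (fun s i =>
      let suf := s.2 * PySem.List.pyGetD A i 0
      (max s.1 suf, suf)) (m, (1 : Int))).1

-- ===== PRECONDITION & SPEC =====
-- Pre_ excludes exactly the inputs where Python A raises IndexError: an empty A (A[0]) or n > len(A)
def Pre_brutual_force (A : List Int) (n : Int) : Prop := A ≠ [] ∧ n ≤ (A.length : Int)
instance (A : List Int) (n : Int) : Decidable (Pre_brutual_force A n) := by unfold Pre_brutual_force; infer_instance
def pvWitness_brutual_force : List Int × Int := ([2, -3, 4], 3)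
def Spec_brutual_force (A : List Int) (n : Int) (out : Int) : Prop := out = brutual_force_alt A n
instance (A : List Int) (n : Int) (out : Int) : Decidable (Spec_brutual_force A n out) := by unfold Spec_brutual_force; infer_instance

-- ===== CLAIM (what is proved, stated in full; the proofs are below) =====
def Claim_equal_brutual_force : Prop := ∀ (A : List Int) (n : Int), Dom_brutual_force A n → Pre_brutual_force A n → Spec_brutual_force A n (brutual_force A n)

-- ===== LEMMAS AND PROOFS =====

-- folding a running product equals the initial value times the product of the mapped list
theorem pv_foldl_mul (g : Int → Int) : ∀ (l : List Int) (c : Int),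
    l.foldl (fun p j => p * g j) c = c * (l.map g).prod := by
  intro l
  induction l with
  | nil => intro c; simp
  | cons x xs ih => intro c; simp [List.foldl_cons, ih, mul_assoc]

-- pulling one max operand out of a max-fold
theorem pv_foldl_max_out (P : Int → Int) : ∀ (l : List Int) (m x : Int),
    l.foldl (fun mm i => max mm (P i)) (max m x) = max (l.foldl (fun mm i => max mm (P i)) m) x := by
  intro l
  induction l with
  | nil => intro m x; simp
  | cons y ys ih => intro m x; simp only [List.foldl_cons, max_right_comm m x (P y), ih]

-- B's suffix-product pass over the reversed index range computes A's forward max-of-products fold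
theorem pv_main (A : List Int) (n : Int) (g : Int → Int) : ∀ (k : Nat), (k : Int) ≤ n →
    ((PySem.List.pyRange (n - k) n 1).reverse.foldl
        (fun s i => (max s.1 (s.2 * g i), s.2 * g i)) (PySem.List.pyGetD A 0 0, (1 : Int)))
      = ((PySem.List.pyRange (n - k) n 1).foldl
          (fun mm i => max mm (((PySem.List.pyRange i n 1).map g).prod)) (PySem.List.pyGetD A 0 0),
         ((PySem.List.pyRange (n - k) n 1).map g).prod) := by
  intro k
  induction k with
  | zero =>
      intro _
      rw [PySem.List.pyRange_one_eq_nil (by omega)]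
      simp
  | succ k ih =>
      intro hk
      have ha : n - (k + 1 : Nat) < n := by push_cast; omega
      rw [PySem.List.pyRange_one_cons ha]
      have hstep : n - (k + 1 : Nat) + 1 = n - (k : Nat) := by push_cast; ring
      rw [hstep]
      have ihh := ih (by push_cast at hk ⊢; omega)
      simp only [List.reverse_cons, List.foldl_append, List.foldl_cons, List.foldl_nil, ihh,
        List.map_cons, List.prod_cons]
      have hsplit : ((PySem.List.pyRange (n - ((k+1 : Nat) : Int)) n 1).map g).prod
          = g (n - ((k+1 : Nat) : Int)) * ((PySem.List.pyRange (n - ((k : Nat) : Int)) n 1).map g).prod := by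
        rw [PySem.List.pyRange_one_cons ha, hstep, List.map_cons, List.prod_cons]
      rw [Prod.mk.injEq]
      refine ⟨?_, mul_comm _ _⟩
      rw [hsplit, pv_foldl_max_out, mul_comm]

theorem pv_ports_eq (A : List Int) (n : Int) : brutual_force A n = brutual_force_alt A n := by
  unfold brutual_force brutual_force_alt
  set g : Int → Int := fun j => PySem.List.pyGetD A j 0 with hg
  simp only
  -- rewrite A's inner product loop into a closed product over the index range
  have hinner : (PySem.List.pyRange 0 n 1).foldl
      (fun m i => max m ((PySem.List.pyRange (i+1) n 1).foldl (fun p j => p * g j) (g i))) (g 0)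
      = (PySem.List.pyRange 0 n 1).foldl
        (fun m i => max m (((PySem.List.pyRange i n 1).map g).prod)) (g 0) := by
    apply PySem.List.foldl_congr_mem
    intro acc x hx
    have hx' := (PySem.List.mem_pyRange_one).1 hx
    rw [pv_foldl_mul, PySem.List.pyRange_one_cons hx'.2, List.map_cons, List.prod_cons]
  -- B's countdown range is the reverse of A's range
  have hrev : PySem.List.pyRange (n-1) (-1) (-1) = (PySem.List.pyRange 0 n 1).reverse := by
    have := PySem.List.pyRange_neg_one_eq_reverse (n-1) (-1)
    simpa using this
  rcases le_or_gt n 0 with hn | hn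
  · rw [PySem.List.pyRange_one_eq_nil hn] at *
    simp [hrev]
  · have hmain := pv_main A n g n.toNat (by omega)
    have h0 : n - (n.toNat : Int) = 0 := by omega
    rw [h0] at hmain
    rw [hinner, hrev, hmain]

-- ===== VERDICT (by name: the statement is the Claim_ definition above) =====
theorem brutual_force_spec : Claim_equal_brutual_force := by
  intro A n _ _
  unfold Spec_brutual_force
  exact pv_ports_eq A n
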